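-- pv_equiv track=rewrite | github.com/August-us/exam | newcoder/pdd/20200901_2.py | union_find
-- ===== SOURCE A (Python) =====
-- def union_find(edges):
--     node_father = {}
--     def getroot(node):
--         if node not in node_father:
--             node_father[node] = node
--         elif node_father[node_father[node]] != node_father[node]:
--             node_father[node] = getroot(node_father[node])
--         return node_father[node]
--
--     for edge in edges:
--         if edge[0] not in node_father:
--             node_father[edge[0]] = getroot(edge[1])
--         elif edge[1] not in node_father :
--             node_father[edge[1]] = getroot(edge[0])
--         else:
--             node_father[getroot(edge[0])] = getroot(edge[1])
--     return node_father
-- ===== SOURCE B (Python) =====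
-- def union_find(edges):
--     node_father = {}
--
--     def getroot(node):
--         if node not in node_father:
--             node_father[node] = node
--             return node
--         # walk to the root iteratively
--         r = node
--         while node_father[r] != r:
--             r = node_father[r]
--         # second pass: point every node on the path at the root
--         cur = node
--         while cur != r:
--             nxt = node_father[cur]
--             node_father[cur] = r
--             cur = nxt
--         return r
--
--     for edge in edges:
--         if edge[0] not in node_father:
--             node_father[edge[0]] = getroot(edge[1])
--         elif edge[1] not in node_father:
--             node_father[edge[1]] = getroot(edge[0])
--         else:
--             node_father[getroot(edge[0])] = getroot(edge[1])
--     return node_father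
-- ===== Notes on version B (the rewrite author's own statement) =====
-- stated objective: alternative
-- what changed: getroot is rewritten from recursive path compression into two iterative loops: one walk to find the root, then a second walk re-pointing every node on the path at the root; the outer edge loop is unchanged.
import Mathlib
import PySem

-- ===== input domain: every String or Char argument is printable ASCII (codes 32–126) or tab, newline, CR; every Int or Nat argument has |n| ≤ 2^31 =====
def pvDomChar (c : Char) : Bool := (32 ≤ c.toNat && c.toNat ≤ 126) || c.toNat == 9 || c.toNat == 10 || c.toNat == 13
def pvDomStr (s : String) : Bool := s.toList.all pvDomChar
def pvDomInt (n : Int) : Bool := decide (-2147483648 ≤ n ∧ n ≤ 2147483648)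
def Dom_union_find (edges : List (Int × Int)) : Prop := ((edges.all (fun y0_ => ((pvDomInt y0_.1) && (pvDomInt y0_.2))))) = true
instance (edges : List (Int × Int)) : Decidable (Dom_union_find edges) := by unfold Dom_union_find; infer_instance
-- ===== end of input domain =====

-- B rewrites the recursive path-compressing getroot into two iterative loops (walk to the
-- root, then re-point each path node at it); same outer edge loop, same returned dict.

-- ===== PORT A =====
-- A's recursive getroot.  The fuel argument only makes the recursion structural: every dict
-- the program builds is a forest, so the parent chain is shorter than d.size + 1 and the
-- fuel-0 branch (and the getD defaults standing for Python's never-raised KeyError) is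
-- unreachable in any reachable state.
def getrootA : Nat → PySem.Dict Int Int → Int → (PySem.Dict Int Int × Int)
  | 0, d, node => (d, d.getD node 0)
  | fuel+1, d, node =>
    if d.contains node = false then
      let d' := d.insert node node
      (d', d'.getD node 0)
    else if d.getD (d.getD node 0) 0 ≠ d.getD node 0 then
      let res := getrootA fuel d (d.getD node 0)
      let d'' := res.1.insert node res.2
      (d'', d''.getD node 0)
    else (d, d.getD node 0)

def union_find (edges : List (Int × Int)) : List (Int × Int) :=
  (edges.foldl (fun d edge =>
    if d.contains edge.1 = false then
      let res := getrootA (d.size + 1) d edge.2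
      res.1.insert edge.1 res.2
    else if d.contains edge.2 = false then
      let res := getrootA (d.size + 1) d edge.1
      res.1.insert edge.2 res.2
    else
      -- Python evaluates the RHS getroot(edge[1]) before the subscript getroot(edge[0])
      let resB := getrootA (d.size + 1) d edge.2
      let resA := getrootA (resB.1.size + 1) resB.1 edge.1
      resA.1.insert resA.2 resB.2
  ) PySem.Dict.empty).items

-- ===== PORT B =====
-- first loop of B's getroot: walk parent pointers until a self-parent (fuel as above)
def findRootB : Nat → PySem.Dict Int Int → Int → Int
  | 0, _, r => r
  | fuel+1, d, r => if d.getD r 0 ≠ r then findRootB fuel d (d.getD r 0) else r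

-- second loop of B's getroot: re-point every node on the path at the root
def compressB : Nat → PySem.Dict Int Int → Int → Int → PySem.Dict Int Int
  | 0, d, _, _ => d
  | fuel+1, d, cur, r =>
    if cur ≠ r then compressB fuel (d.insert cur r) (d.getD cur 0) r else d

def getrootB (d : PySem.Dict Int Int) (node : Int) : PySem.Dict Int Int × Int :=
  if d.contains node = false then (d.insert node node, node)
  else
    let r := findRootB (d.size + 1) d node
    (compressB (d.size + 1) d node r, r)

def union_find_alt (edges : List (Int × Int)) : List (Int × Int) :=
  (edges.foldl (fun d edge =>
    if d.contains edge.1 = false then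
      let res := getrootB d edge.2
      res.1.insert edge.1 res.2
    else if d.contains edge.2 = false then
      let res := getrootB d edge.1
      res.1.insert edge.2 res.2
    else
      let resB := getrootB d edge.2
      let resA := getrootB resB.1 edge.1
      resA.1.insert resA.2 resB.2
  ) PySem.Dict.empty).items

-- ===== PRECONDITION & SPEC =====
def Spec_union_find (edges : List (Int × Int)) (out : List (Int × Int)) : Prop := out = union_find_alt edges
instance (edges : List (Int × Int)) (out : List (Int × Int)) : Decidable (Spec_union_find edges out) := by unfold Spec_union_find; infer_instance

-- ===== CLAIM (what is proved, stated in full; the proofs are below) =====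
def Claim_equal_union_find : Prop := ∀ (edges : List (Int × Int)), Dom_union_find edges → Spec_union_find edges (union_find edges)

-- ===== LEMMAS AND PROOFS =====

def updSet (d : PySem.Dict Int Int) (S : List Int) (r : Int) : PySem.Dict Int Int :=
  PySem.Dict.mk (d.items.map (fun p => if p.1 ∈ S then (p.1, r) else p))

lemma get?_updSet (d : PySem.Dict Int Int) (S : List Int) (r y : Int) :
    (updSet d S r).get? y = if y ∈ S then (d.get? y).map (fun _ => r) else d.get? y := by
  obtain ⟨l⟩ := d
  induction l with
  | nil =>
    show (PySem.Dict.mk (([] : List (Int × Int)).map (fun p => if p.1 ∈ S then (p.1, r) else p))).get? y = _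
    simp only [List.map_nil]
    split <;> rfl
  | cons p rest ih =>
    obtain ⟨k, v⟩ := p
    show (PySem.Dict.mk (((k, v) :: rest).map (fun p => if p.1 ∈ S then (p.1, r) else p))).get? y = _
    have hrest : (PySem.Dict.mk (rest.map (fun p => if p.1 ∈ S then (p.1, r) else p))).get? y
        = if y ∈ S then ((PySem.Dict.mk rest).get? y).map (fun _ => r) else (PySem.Dict.mk rest).get? y := ih
    by_cases hk : k ∈ S
    · simp only [List.map_cons, hk, ite_true]
      rw [PySem.Dict.get?_mk_cons, PySem.Dict.get?_mk_cons]
      by_cases hky : k = y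
      · subst hky; simp [hk]
      · simp only [beq_iff_eq, hky, ite_false]; exact hrest
    · simp only [List.map_cons, hk, ite_false]
      rw [PySem.Dict.get?_mk_cons, PySem.Dict.get?_mk_cons]
      by_cases hky : k = y
      · subst hky; simp [hk]
      · simp only [beq_iff_eq, hky, ite_false]; exact hrest

lemma keys_updSet (d : PySem.Dict Int Int) (S : List Int) (r : Int) :
    (updSet d S r).keys = d.keys := by
  show (d.items.map _).map _ = d.items.map _
  rw [List.map_map]
  apply List.map_congr_left
  intro p _
  by_cases h : p.1 ∈ S <;> simp [h]

lemma insert_updSet (d : PySem.Dict Int Int) (S : List Int) (r x : Int)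
    (h : d.contains x = true) : (updSet d S r).insert x r = updSet d (x :: S) r := by
  apply PySem.Dict.ext
  have hc : (updSet d S r).contains x = true := by
    rw [PySem.Dict.contains_eq_decide_mem_keys, keys_updSet]
    rw [PySem.Dict.contains_eq_decide_mem_keys] at h
    exact h
  rw [PySem.Dict.items_insert_of_contains _ _ hc]
  show (d.items.map _).map _ = d.items.map _
  rw [List.map_map]
  apply List.map_congr_left
  rintro ⟨k, v⟩ _
  by_cases hpx : k = x
  · subst hpx
    by_cases hpS : k ∈ S <;> simp [hpS]
  · by_cases hpS : k ∈ S <;> simp [hpS, hpx]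

lemma updSet_congr (d : PySem.Dict Int Int) (S T : List Int) (r : Int)
    (h : ∀ y, y ∈ S ↔ y ∈ T) : updSet d S r = updSet d T r := by
  apply PySem.Dict.ext
  apply List.map_congr_left
  rintro ⟨k, v⟩ _
  by_cases hp : k ∈ S
  · simp [hp, (h k).mp hp]
  · have : k ∉ T := fun hT => hp ((h k).mpr hT)
    simp [hp, this]

lemma updSet_cons_of_get? (d : PySem.Dict Int Int) (S : List Int) (r y : Int)
    (h : d.get? y = some r) (hnd : d.keys.Nodup) : updSet d (y :: S) r = updSet d S r := by
  apply PySem.Dict.ext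
  apply List.map_congr_left
  rintro ⟨k, v⟩ hp
  by_cases hpy : k = y
  · subst hpy
    have hv : d.get? k = some v := PySem.Dict.get?_of_mem_items d hp hnd
    rw [h] at hv
    have hv' : v = r := by injection hv with h'; exact h'.symm
    subst hv'
    by_cases hpS : k ∈ S <;> simp [hpS]
  · by_cases hpS : k ∈ S <;> simp [hpy, hpS]

lemma contains_of_get?_some (d : PySem.Dict Int Int) (x v : Int) (h : d.get? x = some v) :
    d.contains x = true := by
  rw [PySem.Dict.contains_eq_decide_mem_keys]
  have : ¬ d.get? x = none := by simp [h]
  rw [PySem.Dict.get?_eq_none_iff_not_mem_keys] at this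
  simpa using this

def chainTo (d : PySem.Dict Int Int) : Int → List Int → Int → Prop
  | x, [], r => x = r ∧ d.get? x = some x
  | x, y :: ys, r => y = x ∧ ∃ p, d.get? x = some p ∧ p ≠ x ∧ chainTo d p ys r

lemma chainTo_root (d : PySem.Dict Int Int) :
    ∀ l x r, chainTo d x l r → d.get? r = some r := by
  intro l
  induction l with
  | nil => intro x r ⟨h1, h2⟩; rw [← h1]; exact h2
  | cons y ys ih => rintro x r ⟨-, p, -, -, hc⟩; exact ih p r hc

lemma chainTo_append (d : PySem.Dict Int Int) :
    ∀ as x y bs r, chainTo d x (as ++ y :: bs) r → chainTo d y (y :: bs) r := by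
  intro as
  induction as with
  | nil =>
    intro x y bs r h
    obtain ⟨h1, rest⟩ := h
    subst h1
    exact ⟨rfl, rest⟩
  | cons a as' ih =>
    rintro x y bs r ⟨-, p, -, -, hc⟩
    exact ih p y bs r hc

lemma chainTo_unique (d : PySem.Dict Int Int) :
    ∀ l x r l' r', chainTo d x l r → chainTo d x l' r' → l = l' ∧ r = r' := by
  intro l
  induction l with
  | nil =>
    rintro x r l' r' ⟨hxr, hx⟩ h'
    cases l' with
    | nil => obtain ⟨hxr', -⟩ := h'; exact ⟨rfl, hxr ▸ hxr' ▸ rfl⟩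
    | cons y ys =>
      obtain ⟨-, p, hp, hpx, -⟩ := h'
      rw [hx] at hp
      exact absurd (by injection hp) (Ne.symm hpx)
  | cons y ys ih =>
    rintro x r l' r' ⟨hyx, p, hp, hpx, hc⟩ h'
    cases l' with
    | nil =>
      obtain ⟨-, hx⟩ := h'
      rw [hx] at hp
      exact absurd (by injection hp) (Ne.symm hpx)
    | cons y' ys' =>
      obtain ⟨hyx', p', hp', -, hc'⟩ := h'
      rw [hp] at hp'
      have hpp : p = p' := by injection hp'
      subst hpp
      obtain ⟨h1, h2⟩ := ih p r ys' r' hc hc'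
      exact ⟨by rw [hyx, hyx', h1], h2⟩

lemma chainTo_nodup (d : PySem.Dict Int Int) :
    ∀ l x r, chainTo d x l r → (l ++ [r]).Nodup := by
  intro l
  induction l with
  | nil => intro x r _; simp
  | cons y ys ih =>
    intro x r h
    obtain ⟨hyx, p, hp, hpx, hc⟩ := h
    subst hyx
    have hnd := ih p r hc
    simp only [List.cons_append, List.nodup_cons]
    refine ⟨?_, hnd⟩
    intro hmem
    rcases List.mem_append.mp hmem with hys | hr
    · -- y occurs in ys: extract a shorter chain from y, contradict uniqueness
      obtain ⟨as, bs, rfl⟩ := List.append_of_mem hys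
      have h1 : chainTo d y (y :: bs) r := chainTo_append d (y :: as) y y bs r ⟨rfl, p, hp, hpx, hc⟩
      have h2 : chainTo d y (y :: (as ++ y :: bs)) r := ⟨rfl, p, hp, hpx, hc⟩
      obtain ⟨heq, -⟩ := chainTo_unique d _ y r _ r h1 h2
      have := congrArg List.length heq
      simp at this
      omega
    · -- y = r: then get? y = some y contradicting p ≠ y
      have hy : y = r := by simpa using hr
      subst hy
      have hroot := chainTo_root d _ _ _ hc
      rw [hroot] at hp
      exact hpx (by injection hp with h; exact h.symm)

lemma chainTo_keys (d : PySem.Dict Int Int) :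
    ∀ l x r, chainTo d x l r → ∀ y ∈ l ++ [r], y ∈ d.keys := by
  intro l
  induction l with
  | nil =>
    rintro x r ⟨hxr, hx⟩ y hy
    have : y = r := by simpa using hy
    subst this
    subst hxr
    have : ¬ d.get? x = none := by simp [hx]
    rw [PySem.Dict.get?_eq_none_iff_not_mem_keys] at this
    simpa using this
  | cons z zs ih =>
    rintro x r ⟨hzx, p, hp, hpx, hc⟩ y hy
    subst hzx
    rcases List.mem_cons.mp hy with rfl | hy'
    · have : ¬ d.get? y = none := by simp [hp]
      rw [PySem.Dict.get?_eq_none_iff_not_mem_keys] at this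
      simpa using this
    · exact ih p r hc y hy'

lemma chainTo_length (d : PySem.Dict Int Int) (l : List Int) (x r : Int)
    (h : chainTo d x l r) : l.length < d.size + 1 := by
  have hnd := chainTo_nodup d l x r h
  have hsub : l ++ [r] ⊆ d.keys := fun y hy => chainTo_keys d l x r h y hy
  have := (hnd.subperm hsub).length_le
  have hk : d.keys.length = d.size := by
    show (d.items.map _).length = d.items.length
    simp
  simp at this
  omega

lemma chainTo_last (d : PySem.Dict Int Int) :
    ∀ l' y x r, chainTo d x (l' ++ [y]) r → d.get? y = some r := by
  intro l' y x r h
  have h1 : chainTo d y (y :: []) r := chainTo_append d l' x y [] r (by simpa using h)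
  obtain ⟨-, p, hp, -, hpr, -⟩ := h1
  rw [hp, hpr]

lemma chainTo_nonroot (d : PySem.Dict Int Int) :
    ∀ l x r, chainTo d x l r → ∀ y ∈ l, ¬ d.get? y = some y := by
  intro l x r h y hy hself
  obtain ⟨as, bs, rfl⟩ := List.append_of_mem hy
  have h1 : chainTo d y (y :: bs) r := chainTo_append d as x y bs r h
  obtain ⟨-, p, hp, hpx, -⟩ := h1
  rw [hself] at hp
  exact hpx (by injection hp with h; exact h.symm)

lemma chain_transfer (d d' : PySem.Dict Int Int) (r : Int)
    (hy : ∀ y, d'.get? y = d.get? y ∨ d'.get? y = some r)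
    (hr : d'.get? r = some r) :
    ∀ l x rt, chainTo d x l rt → ∃ l' r', chainTo d' x l' r' := by
  intro l
  induction l with
  | nil =>
    rintro x rt ⟨hxr, hx⟩
    rcases hy x with h | h
    · exact ⟨[], x, rfl, h.trans hx⟩
    · by_cases hxr' : r = x
      · exact ⟨[], x, rfl, hxr' ▸ h⟩
      · exact ⟨[x], r, rfl, r, h, hxr', rfl, hr⟩
  | cons z zs ih =>
    rintro x rt ⟨hzx, p, hp, hpx, hc⟩
    subst hzx
    rcases hy z with h | h
    · obtain ⟨l', r', hc'⟩ := ih p rt hc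
      exact ⟨z :: l', r', rfl, p, h.trans hp, hpx, hc'⟩
    · by_cases hxr' : r = z
      · exact ⟨[], z, rfl, hxr' ▸ h⟩
      · exact ⟨[z], r, rfl, r, h, hxr', rfl, hr⟩
lemma updSet_nil (d : PySem.Dict Int Int) (r : Int) : updSet d [] r = d := by
  apply PySem.Dict.ext
  show d.items.map _ = d.items
  simp

lemma getD_of_get? (d : PySem.Dict Int Int) (x v : Int) (h : d.get? x = some v) :
    d.getD x 0 = v := by
  rw [PySem.Dict.getD_eq_get?_getD, h]; rfl

lemma getrootA_spec (d : PySem.Dict Int Int) :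
    ∀ l x r fuel, chainTo d x l r → l.length < fuel →
      getrootA fuel d x = (updSet d l.dropLast r, r) := by
  intro l
  induction l with
  | nil =>
    rintro x r fuel ⟨rfl, hx⟩ hf
    cases fuel with
    | zero => omega
    | succ f =>
      have hcont : d.contains x = true := contains_of_get?_some d x x hx
      have hgd : d.getD x 0 = x := getD_of_get? d x x hx
      simp [getrootA, hcont, hgd, updSet_nil]
  | cons z zs ih =>
    rintro x r fuel ⟨rfl, p, hp, hpx, hc⟩ hf
    cases fuel with
    | zero => simp at hf
    | succ f =>
      have hcont : d.contains z = true := contains_of_get?_some d z p hp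
      have hgd : d.getD z 0 = p := getD_of_get? d z p hp
      cases zs with
      | nil =>
        obtain ⟨rfl, hproot⟩ := hc
        have hgp : d.getD p 0 = p := getD_of_get? d p p hproot
        simp [getrootA, hcont, hgd, hgp, updSet_nil]
      | cons w ws =>
        obtain ⟨rfl, q, hq, hqw, hc'⟩ := hc
        have hgp : d.getD w 0 = q := getD_of_get? d w q hq
        have hrec := ih w r f ⟨rfl, q, hq, hqw, hc'⟩ (by simp at hf ⊢; omega)
        have hins : (updSet d (w :: ws).dropLast r).insert z r = updSet d (z :: (w :: ws).dropLast) r :=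
          insert_updSet d _ r z hcont
        have hgetD : (updSet d (z :: (w :: ws).dropLast) r).getD z 0 = r := by
          rw [PySem.Dict.getD_eq_get?_getD, get?_updSet]; simp [hp]
        simp only [getrootA, hcont, Bool.true_eq_false, if_false, hgd, hgp, ne_eq, hqw,
          not_false_iff, if_true, hrec, hins, hgetD]
        simp [List.dropLast]

lemma findRootB_spec (d : PySem.Dict Int Int) :
    ∀ l x r fuel, chainTo d x l r → l.length < fuel → findRootB fuel d x = r := by
  intro l
  induction l with
  | nil =>
    rintro x r fuel ⟨rfl, hx⟩ hf
    cases fuel with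
    | zero => omega
    | succ f =>
      have hgd : d.getD x 0 = x := getD_of_get? d x x hx
      simp [findRootB, hgd]
  | cons z zs ih =>
    rintro x r fuel ⟨rfl, p, hp, hpx, hc⟩ hf
    cases fuel with
    | zero => simp at hf
    | succ f =>
      have hgd : d.getD z 0 = p := getD_of_get? d z p hp
      have hrec := ih p r f hc (by simp at hf ⊢; omega)
      simp [findRootB, hgd, hpx, hrec]

lemma compressB_spec (d0 : PySem.Dict Int Int) :
    ∀ l x r fuel S, chainTo d0 x l r → l.length < fuel → (∀ y ∈ l, y ∉ S) →
      compressB fuel (updSet d0 S r) x r = updSet d0 (l.reverse ++ S) r := by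
  intro l
  induction l with
  | nil =>
    rintro x r fuel S ⟨rfl, hx⟩ hf hS
    cases fuel with
    | zero => omega
    | succ f => simp [compressB]
  | cons z zs ih =>
    rintro x r fuel S ⟨rfl, p, hp, hpx, hc⟩ hf hS
    cases fuel with
    | zero => simp at hf
    | succ f =>
      have hnd := chainTo_nodup d0 (z :: zs) z r ⟨rfl, p, hp, hpx, hc⟩
      simp only [List.cons_append, List.nodup_cons, List.mem_append] at hnd
      have hzr : z ≠ r := fun h => hnd.1 (Or.inr (by simp [h]))
      have hzzs : z ∉ zs := fun h => hnd.1 (Or.inl h)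
      have hzS : z ∉ S := hS z List.mem_cons_self
      have hgd : (updSet d0 S r).getD z 0 = p := by
        rw [PySem.Dict.getD_eq_get?_getD, get?_updSet]
        simp [hzS, hp]
      have hins : (updSet d0 S r).insert z r = updSet d0 (z :: S) r :=
        insert_updSet d0 S r z (contains_of_get?_some d0 z p hp)
      have hS' : ∀ y ∈ zs, y ∉ z :: S := by
        intro y hy
        simp only [List.mem_cons, not_or]
        exact ⟨fun h => hzzs (h ▸ hy), hS y (List.mem_cons_of_mem z hy)⟩
      have hrec := ih p r f (z :: S) hc (by simp at hf ⊢; omega) hS'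
      simp only [compressB, hzr, ne_eq, not_false_iff, if_true, hgd, hins, hrec]
      apply updSet_congr
      intro y
      simp only [List.mem_append, List.mem_reverse, List.mem_cons, List.reverse_cons]
      tauto

def UFInv (d : PySem.Dict Int Int) : Prop :=
  d.keys.Nodup ∧ ∀ x ∈ d.keys, ∃ l r, chainTo d x l r

lemma getroot_main (d : PySem.Dict Int Int) (x : Int) (hInv : UFInv d) :
    ∃ d' r, getrootA (d.size + 1) d x = (d', r) ∧ getrootB d x = (d', r) ∧ UFInv d' ∧
      d'.get? r = some r ∧
      (∀ y, d'.get? y = d.get? y ∨ d'.get? y = some r) ∧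
      (∀ y, d.get? y = some y → d'.get? y = some y) := by
  obtain ⟨hnd, hchain⟩ := hInv
  by_cases hc : d.contains x = true
  · obtain ⟨l, r, hch⟩ := hchain x ((PySem.Dict.contains_iff_mem_keys d x).mp hc)
    have hlen := chainTo_length d l x r hch
    have hndl := chainTo_nodup d l x r hch
    have hrl : r ∉ l := by
      rcases List.nodup_append.mp hndl with ⟨-, -, hdisj⟩
      intro hmem
      exact hdisj r hmem r (by simp) rfl
    have hA : getrootA (d.size + 1) d x = (updSet d l.dropLast r, r) :=
      getrootA_spec d l x r _ hch hlen
    have hfind : findRootB (d.size + 1) d x = r := findRootB_spec d l x r _ hch hlen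
    have hcomp : compressB (d.size + 1) d x r = updSet d l.dropLast r := by
      have h1 := compressB_spec d l x r (d.size + 1) [] hch hlen (by simp)
      rw [updSet_nil] at h1
      rw [h1]
      rcases List.eq_nil_or_concat l with rfl | ⟨l', y, rfl⟩
      · simp
      · simp only [List.concat_eq_append] at hch hlen hndl hrl ⊢
        have hlast : d.get? y = some r := chainTo_last d l' y x r hch
        have h2 : updSet d ((l' ++ [y]).reverse ++ []) r = updSet d (y :: l'.reverse) r := by
          apply updSet_congr; intro z; simp
        rw [h2, updSet_cons_of_get? d l'.reverse r y hlast hnd]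
        apply updSet_congr; intro z; simp
    have hB : getrootB d x = (updSet d l.dropLast r, r) := by
      rw [getrootB]
      simp [hc, hfind, hcomp]
    refine ⟨updSet d l.dropLast r, r, hA, hB, ?_, ?_, ?_, ?_⟩
    · -- UFInv preserved
      constructor
      · rw [keys_updSet]; exact hnd
      · intro y hy
        rw [keys_updSet] at hy
        obtain ⟨ly, ry, hcy⟩ := hchain y hy
        apply chain_transfer d (updSet d l.dropLast r) r _ _ ly y ry hcy
        · intro z
          rw [get?_updSet]
          split
          · cases hz : d.get? z with
            | none => left; simp
            | some v => right; simp
          · left; rfl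
        · rw [get?_updSet]
          have : r ∉ l.dropLast := fun hmem => hrl (List.dropLast_subset l hmem)
          simp [this, chainTo_root d l x r hch]
    · rw [get?_updSet]
      have : r ∉ l.dropLast := fun hmem => hrl (List.dropLast_subset l hmem)
      simp [this, chainTo_root d l x r hch]
    · intro z
      rw [get?_updSet]
      split
      · cases hz : d.get? z with
        | none => left; simp
        | some v => right; simp
      · left; rfl
    · intro y hyroot
      have hynl : y ∉ l := fun hm => chainTo_nonroot d l x r hch y hm hyroot
      have : y ∉ l.dropLast := fun hmem => hynl (List.dropLast_subset l hmem)
      rw [get?_updSet]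
      simp [this, hyroot]
  · -- fresh node
    have hc' : d.contains x = false := by simpa using hc
    refine ⟨d.insert x x, x, ?_, ?_, ?_, ?_, ?_, ?_⟩
    · simp [getrootA, hc', PySem.Dict.getD_insert_self]
    · simp [getrootB, hc']
    · constructor
      · exact PySem.Dict.nodup_keys_insert d x x hnd
      · intro y hy
        rcases (PySem.Dict.mem_keys_insert d x y x).mp hy with rfl | hy'
        · exact ⟨[], y, rfl, PySem.Dict.get?_insert_self d y y⟩
        · obtain ⟨ly, ry, hcy⟩ := hchain y hy'
          apply chain_transfer d (d.insert x x) x _ _ ly y ry hcy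
          · intro z
            rw [PySem.Dict.get?_insert]
            split
            · right; rfl
            · left; rfl
          · exact PySem.Dict.get?_insert_self d x x
    · exact PySem.Dict.get?_insert_self d x x
    · intro z
      rw [PySem.Dict.get?_insert]
      split
      · right; rfl
      · left; rfl
    · intro y hyroot
      rw [PySem.Dict.get?_insert]
      split
      · rename_i h; rw [h]
      · exact hyroot

lemma UFInv_insert_root (d : PySem.Dict Int Int) (a r : Int) (hInv : UFInv d)
    (hr : d.get? r = some r) : UFInv (d.insert a r) := by
  obtain ⟨hnd, hchain⟩ := hInv
  have hr' : (d.insert a r).get? r = some r := by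
    rw [PySem.Dict.get?_insert]
    split
    · rename_i h; rw [h]
    · exact hr
  have htrans : ∀ y, (d.insert a r).get? y = d.get? y ∨ (d.insert a r).get? y = some r := by
    intro z
    rw [PySem.Dict.get?_insert]
    split
    · right; rfl
    · left; rfl
  constructor
  · exact PySem.Dict.nodup_keys_insert d a r hnd
  · intro y hy
    rcases (PySem.Dict.mem_keys_insert d a y r).mp hy with rfl | hy'
    · by_cases har : y = r
      · subst har
        exact ⟨[], y, rfl, hr'⟩
      · refine ⟨[y], r, rfl, r, ?_, fun h => har h.symm, rfl, hr'⟩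
        rw [PySem.Dict.get?_insert]
        simp
    · obtain ⟨ly, ry, hcy⟩ := hchain y hy'
      exact chain_transfer d (d.insert a r) r htrans hr' ly y ry hcy

lemma step_eq (d : PySem.Dict Int Int) (e : Int × Int) (hInv : UFInv d) :
    (if d.contains e.1 = false then
      let res := getrootA (d.size + 1) d e.2
      res.1.insert e.1 res.2
    else if d.contains e.2 = false then
      let res := getrootA (d.size + 1) d e.1
      res.1.insert e.2 res.2
    else
      let resB := getrootA (d.size + 1) d e.2
      let resA := getrootA (resB.1.size + 1) resB.1 e.1
      resA.1.insert resA.2 resB.2) =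
    (if d.contains e.1 = false then
      let res := getrootB d e.2
      res.1.insert e.1 res.2
    else if d.contains e.2 = false then
      let res := getrootB d e.1
      res.1.insert e.2 res.2
    else
      let resB := getrootB d e.2
      let resA := getrootB resB.1 e.1
      resA.1.insert resA.2 resB.2) ∧
    UFInv (if d.contains e.1 = false then
      let res := getrootB d e.2
      res.1.insert e.1 res.2
    else if d.contains e.2 = false then
      let res := getrootB d e.1
      res.1.insert e.2 res.2
    else
      let resB := getrootB d e.2
      let resA := getrootB resB.1 e.1
      resA.1.insert resA.2 resB.2) := by
  by_cases h1 : d.contains e.1 = false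
  · obtain ⟨d', r, hA, hB, hInv', hroot, -, -⟩ := getroot_main d e.2 hInv
    simp only [h1, if_true, hA, hB]
    exact ⟨trivial, UFInv_insert_root d' e.1 r hInv' hroot⟩
  · have hc1 : d.contains e.1 = true := by simpa using h1
    by_cases h2 : d.contains e.2 = false
    · obtain ⟨d', r, hA, hB, hInv', hroot, -, -⟩ := getroot_main d e.1 hInv
      simp only [hc1, Bool.true_eq_false, if_false, h2, if_true, hA, hB]
      exact ⟨trivial, UFInv_insert_root d' e.2 r hInv' hroot⟩
    · have hc2 : d.contains e.2 = true := by simpa using h2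
      obtain ⟨d1, rb, hA1, hB1, hInv1, hroot1, -, -⟩ := getroot_main d e.2 hInv
      obtain ⟨d2, ra, hA2, hB2, hInv2, hroot2, -, hroots2⟩ := getroot_main d1 e.1 hInv1
      have hrb2 : d2.get? rb = some rb := hroots2 rb hroot1
      simp only [hc1, hc2, Bool.true_eq_false, if_false, hA1, hB1, hA2, hB2]
      exact ⟨trivial, UFInv_insert_root d2 ra rb hInv2 hrb2⟩

lemma foldl_eq_of_step (f g : PySem.Dict Int Int → (Int × Int) → PySem.Dict Int Int)
    (P : PySem.Dict Int Int → Prop)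
    (h : ∀ d a, P d → f d a = g d a ∧ P (g d a)) :
    ∀ (l : List (Int × Int)) d, P d → l.foldl f d = l.foldl g d := by
  intro l
  induction l with
  | nil => intro d _; rfl
  | cons a as ih =>
    intro d hP
    obtain ⟨heq, hP'⟩ := h d a hP
    simp only [List.foldl_cons, heq]
    exact ih (g d a) hP'

lemma UFInv_empty : UFInv PySem.Dict.empty := by
  constructor
  · simp [PySem.Dict.keys_empty]
  · intro x hx
    rw [PySem.Dict.keys_empty] at hx
    simp at hx

-- ===== VERDICT (by name: the statement is the Claim_ definition above) =====
theorem union_find_spec : Claim_equal_union_find := by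
  intro edges _
  show union_find edges = union_find_alt edges
  unfold union_find union_find_alt
  congr 1
  exact foldl_eq_of_step _ _ UFInv (fun d a hP => step_eq d a hP) edges PySem.Dict.empty UFInv_empty
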